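-- pv_equiv track=rewrite | github.com/gyeonglee0317/2025ESWContest_free_1162 | project/sensors/spi.py | pack_tx_frame
-- ===== SOURCE A (Python) =====
-- def pack_tx_frame(pedal: int, expression: int, bpm: int, rr: int) -> list:
--     pedal, expression, bpm, rr = pedal & 0xFF, expression & 0xFF, bpm & 0xFF, rr & 0xFF
--     w = 0
--     w |= (pedal & 0xFF) << 24
--     w |= (expression & 0xFF) << 16
--     w |= (bpm & 0xFF) << 8
--     w |= (rr & 0xFF)
--     return [(w >> s) & 0xFF for s in (56,48,40,32,24,16,8,0)]
-- ===== SOURCE B (Python) =====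
-- def pack_tx_frame(pedal: int, expression: int, bpm: int, rr: int) -> list:
--     # The 32-bit word only ever fills the low four bytes, so the frame is
--     # four zero bytes followed by the four masked inputs in order.
--     return [0, 0, 0, 0, pedal & 0xFF, expression & 0xFF, bpm & 0xFF, rr & 0xFF]
-- ===== Notes on version B (the rewrite author's own statement) =====
-- stated objective: simpler
-- what changed: B returns the 8-byte list directly as four zeros followed by the four masked inputs, never packing an integer word or running a byte-extraction comprehension.
import Mathlib
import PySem

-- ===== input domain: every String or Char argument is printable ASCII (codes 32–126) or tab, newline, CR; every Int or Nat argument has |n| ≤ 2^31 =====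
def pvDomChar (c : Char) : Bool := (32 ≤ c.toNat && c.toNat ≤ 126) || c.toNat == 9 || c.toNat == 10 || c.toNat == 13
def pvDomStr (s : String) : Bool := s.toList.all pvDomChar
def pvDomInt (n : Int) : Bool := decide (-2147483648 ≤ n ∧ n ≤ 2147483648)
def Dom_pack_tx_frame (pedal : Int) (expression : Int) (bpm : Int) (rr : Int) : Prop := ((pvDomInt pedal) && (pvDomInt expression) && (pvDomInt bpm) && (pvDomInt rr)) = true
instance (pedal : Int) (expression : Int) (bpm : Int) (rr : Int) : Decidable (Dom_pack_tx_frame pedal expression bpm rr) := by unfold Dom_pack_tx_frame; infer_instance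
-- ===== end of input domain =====

-- B builds the frame directly ([0,0,0,0, bytes…]) instead of packing a word and extracting bytes; objective: simpler.

-- ===== PORT A =====
def pack_tx_frame (pedal : Int) (expression : Int) (bpm : Int) (rr : Int) : List Int :=
  let pedal := PySem.Int.band pedal 255
  let expression := PySem.Int.band expression 255
  let bpm := PySem.Int.band bpm 255
  let rr := PySem.Int.band rr 255
  let w : Int := 0
  let w := PySem.Int.bor w (PySem.Int.band pedal 255 <<< (24:Nat))
  let w := PySem.Int.bor w (PySem.Int.band expression 255 <<< (16:Nat))
  let w := PySem.Int.bor w (PySem.Int.band bpm 255 <<< (8:Nat))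
  let w := PySem.Int.bor w (PySem.Int.band rr 255)
  ([56, 48, 40, 32, 24, 16, 8, 0] : List Nat).map (fun (s : Nat) => PySem.Int.band (w >>> s) 255)

-- ===== PORT B =====
def pack_tx_frame_alt (pedal : Int) (expression : Int) (bpm : Int) (rr : Int) : List Int :=
  [0, 0, 0, 0, PySem.Int.band pedal 255, PySem.Int.band expression 255,
   PySem.Int.band bpm 255, PySem.Int.band rr 255]

-- ===== PRECONDITION & SPEC =====
def Spec_pack_tx_frame (pedal : Int) (expression : Int) (bpm : Int) (rr : Int) (out : List Int) : Prop := out = pack_tx_frame_alt pedal expression bpm rr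
instance (pedal : Int) (expression : Int) (bpm : Int) (rr : Int) (out : List Int) : Decidable (Spec_pack_tx_frame pedal expression bpm rr out) := by unfold Spec_pack_tx_frame; infer_instance

-- ===== CLAIM (what is proved, stated in full; the proofs are below) =====
def Claim_equal_pack_tx_frame : Prop := ∀ (pedal : Int) (expression : Int) (bpm : Int) (rr : Int), Dom_pack_tx_frame pedal expression bpm rr → Spec_pack_tx_frame pedal expression bpm rr (pack_tx_frame pedal expression bpm rr)

-- ===== LEMMAS AND PROOFS =====

-- Python's a & 0xFF is a % 256 (floor mod), for every integer a.
theorem pv_band_mask (a : Int) : PySem.Int.band a 255 = a % 256 := by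
  unfold PySem.Int.band
  split_ifs with h h2 h2
  · show ((a.toNat &&& (255:Int).toNat : ℕ) : Int) = a % 256
    have : a.toNat &&& (255:Int).toNat = a.toNat % 256 := by
      have := Nat.and_two_pow_sub_one_eq_mod a.toNat 8
      norm_num at this ⊢
      exact this
    rw [this]
    push_cast
    omega
  · omega
  · show (((255:Int).toNat - ((255:Int).toNat &&& (-a - 1).toNat) : ℕ) : Int) = a % 256
    have : (255:Int).toNat &&& (-a - 1).toNat = (-a - 1).toNat % 256 := by
      have := Nat.and_two_pow_sub_one_eq_mod (-a - 1).toNat 8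
      norm_num at this ⊢
      rw [Nat.and_comm]
      exact this
    rw [this]
    have h255 : ((255:Int).toNat) = 255 := rfl
    rw [h255]
    have hm : (-a - 1).toNat % 256 ≤ 255 := by omega
    push_cast [hm]
    omega
  · omega

-- a masked byte, moved to ℕ
theorem pv_band_mask_toNat (a : Int) :
    PySem.Int.band a 255 = (((a % 256).toNat : ℕ) : Int) := by
  rw [pv_band_mask]; omega

theorem pv_shl_and_zero (x y k : ℕ) (h : y < 2 ^ k) : (x <<< k) &&& y = 0 := by
  apply Nat.eq_of_testBit_eq
  intro i
  simp only [Nat.testBit_and, Nat.testBit_shiftLeft, Nat.zero_testBit, Bool.and_eq_false_iff]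
  by_cases hk : k ≤ i
  · right
    exact Nat.testBit_lt_two_pow (lt_of_lt_of_le h (Nat.pow_le_pow_right (by norm_num) hk))
  · left
    simp [hk]

theorem pv_and_255 (x : ℕ) (h : x < 256) : x &&& 255 = x := by
  have := Nat.and_two_pow_sub_one_eq_mod x 8
  norm_num at this
  omega

theorem pv_or_lt (x y k : ℕ) (hx : x < 2 ^ k) (hy : y < 2 ^ k) : x ||| y < 2 ^ k :=
  Nat.or_lt_two_pow hx hy

-- the byte layout of the packed word
theorem pv_word_bytes (p e b r : ℕ) (hp : p < 256) (he : e < 256) (hb : b < 256) (hr : r < 256) :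
    (([56, 48, 40, 32, 24, 16, 8, 0] : List Nat).map
      (fun s => ((((p <<< 24 ||| e <<< 16) ||| b <<< 8) ||| r) >>> s) &&& 255))
    = [0, 0, 0, 0, p, e, b, r] := by
  have hps : p <<< 24 = p * 2 ^ 24 := Nat.shiftLeft_eq p 24
  have hes : e <<< 16 = e * 2 ^ 16 := Nat.shiftLeft_eq e 16
  have hbs : b <<< 8 = b * 2 ^ 8 := Nat.shiftLeft_eq b 8
  -- the word is < 2^32
  have hw : ((p <<< 24 ||| e <<< 16) ||| b <<< 8) ||| r < 2 ^ 32 := by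
    have h1 : p <<< 24 < 2 ^ 32 := by rw [hps]; omega
    have h2 : e <<< 16 < 2 ^ 32 := by rw [hes]; omega
    have h3 : b <<< 8 < 2 ^ 32 := by rw [hbs]; omega
    have h4 : r < 2 ^ 32 := by omega
    exact pv_or_lt _ _ _ (pv_or_lt _ _ _ (pv_or_lt _ _ _ h1 h2) h3) h4
  have hhi : ∀ s : ℕ, 32 ≤ s →
      ((((p <<< 24 ||| e <<< 16) ||| b <<< 8) ||| r) >>> s) &&& 255 = 0 := by
    intro s hs
    have : (((p <<< 24 ||| e <<< 16) ||| b <<< 8) ||| r) >>> s = 0 := by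
      rw [Nat.shiftRight_eq_div_pow]
      have : (2:ℕ) ^ 32 ≤ 2 ^ s := Nat.pow_le_pow_right (by norm_num) hs
      exact Nat.div_eq_of_lt (lt_of_lt_of_le hw this)
    rw [this]; rfl
  simp only [List.map_cons, List.map_nil]
  rw [hhi 56 (by norm_num), hhi 48 (by norm_num), hhi 40 (by norm_num), hhi 32 (by norm_num)]
  -- low four bytes
  simp only [Nat.shiftRight_or_distrib, Nat.and_or_distrib_right]
  rw [hps, hes, hbs]
  -- shift each product right by 24, 16, 8, 0
  simp only [Nat.shiftRight_eq_div_pow]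
  have d1 : p * 2 ^ 24 / 2 ^ 24 = p := Nat.mul_div_cancel p (by norm_num)
  have d2 : e * 2 ^ 16 / 2 ^ 24 = 0 := Nat.div_eq_of_lt (by omega)
  have d3 : b * 2 ^ 8 / 2 ^ 24 = 0 := Nat.div_eq_of_lt (by omega)
  have d4 : r / 2 ^ 24 = 0 := Nat.div_eq_of_lt (by omega)
  have d5 : p * 2 ^ 24 / 2 ^ 16 = p * 2 ^ 8 := by
    rw [show (2:ℕ) ^ 24 = 2 ^ 8 * 2 ^ 16 by norm_num, ← Nat.mul_assoc]
    exact Nat.mul_div_cancel _ (by norm_num)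
  have d6 : e * 2 ^ 16 / 2 ^ 16 = e := Nat.mul_div_cancel e (by norm_num)
  have d7 : b * 2 ^ 8 / 2 ^ 16 = 0 := Nat.div_eq_of_lt (by omega)
  have d8 : r / 2 ^ 16 = 0 := Nat.div_eq_of_lt (by omega)
  have d9 : p * 2 ^ 24 / 2 ^ 8 = p * 2 ^ 16 := by
    rw [show (2:ℕ) ^ 24 = 2 ^ 16 * 2 ^ 8 by norm_num, ← Nat.mul_assoc]
    exact Nat.mul_div_cancel _ (by norm_num)
  have d10 : e * 2 ^ 16 / 2 ^ 8 = e * 2 ^ 8 := by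
    rw [show (2:ℕ) ^ 16 = 2 ^ 8 * 2 ^ 8 by norm_num, ← Nat.mul_assoc]
    exact Nat.mul_div_cancel _ (by norm_num)
  have d11 : b * 2 ^ 8 / 2 ^ 8 = b := Nat.mul_div_cancel b (by norm_num)
  have d12 : r / 2 ^ 8 = 0 := Nat.div_eq_of_lt (by omega)
  rw [d1, d2, d3, d4, d5, d6, d7, d8, d9, d10, d11, d12]
  have z8 : ∀ x : ℕ, x * 2 ^ 8 &&& 255 = 0 := fun x => by
    have := pv_shl_and_zero x 255 8 (by norm_num)
    rwa [Nat.shiftLeft_eq] at this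
  have z16 : ∀ x : ℕ, x * 2 ^ 16 &&& 255 = 0 := fun x => by
    have := pv_shl_and_zero x 255 16 (by norm_num)
    rwa [Nat.shiftLeft_eq] at this
  have z24 : ∀ x : ℕ, x * 2 ^ 24 &&& 255 = 0 := fun x => by
    have := pv_shl_and_zero x 255 24 (by norm_num)
    rwa [Nat.shiftLeft_eq] at this
  simp only [z8, z16, z24, pv_and_255 p hp, pv_and_255 e he, pv_and_255 b hb, pv_and_255 r hr,
    Nat.zero_or, Nat.or_zero, Nat.pow_zero, Nat.div_one, Nat.zero_and]

-- ===== VERDICT (by name: the statement is the Claim_ definition above) =====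
theorem pack_tx_frame_spec : Claim_equal_pack_tx_frame := by
  intro pedal expression bpm rr _
  unfold Spec_pack_tx_frame pack_tx_frame pack_tx_frame_alt
  -- name the masked bytes as naturals
  set pn : ℕ := (pedal % 256).toNat with hpn
  set en : ℕ := (expression % 256).toNat with hen
  set bn : ℕ := (bpm % 256).toNat with hbn
  set rn : ℕ := (rr % 256).toNat with hrn
  have hp : pn < 256 := by omega
  have he : en < 256 := by omega
  have hb : bn < 256 := by omega
  have hr : rn < 256 := by omega
  have mp : PySem.Int.band pedal 255 = (pn : Int) := pv_band_mask_toNat pedal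
  have me : PySem.Int.band expression 255 = (en : Int) := pv_band_mask_toNat expression
  have mb : PySem.Int.band bpm 255 = (bn : Int) := pv_band_mask_toNat bpm
  have mr : PySem.Int.band rr 255 = (rn : Int) := pv_band_mask_toNat rr
  simp only [mp, me, mb, mr]
  -- the second & 0xFF is the identity on a byte
  have idem : ∀ x : ℕ, x < 256 → PySem.Int.band (x : Int) 255 = (x : Int) := by
    intro x hx
    rw [pv_band_mask]
    omega
  rw [idem pn hp, idem en he, idem bn hb, idem rn hr]
  -- push the word computation down to ℕ
  have cast_shl : ∀ (m k : ℕ), ((m : Int) <<< (k : Nat)) = ((m <<< k : ℕ) : Int) :=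
    fun m k => Int.mem_toNat?.mp rfl
  have cast_shr : ∀ (m k : ℕ), ((m : Int) >>> (k : Nat)) = ((m >>> k : ℕ) : Int) :=
    fun m k => Int.mem_toNat?.mp rfl
  have bor0 : ∀ x : Int, PySem.Int.bor 0 x = x := by
    intro x
    rw [PySem.Int.bor_comm]
    exact PySem.Int.bor_zero x
  simp only [bor0, cast_shl, cast_shr, PySem.Int.bor_natCast]
  have bytes := pv_word_bytes pn en bn rn hp he hb hr
  simp only [List.map_cons, List.map_nil] at bytes ⊢
  rw [show ((255:Int)) = ((255:ℕ) : Int) from rfl]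
  simp only [PySem.Int.band_natCast]
  have h2 := congrArg (List.map (fun n : ℕ => (n : Int))) bytes
  simp only [List.map_cons, List.map_nil, Nat.cast_zero] at h2
  exact h2
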